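-- pv_equiv track=rewrite | github.com/AamindMandragora/focal-lab | proofs/VerifiedAgentSynthesis-py-py/module_.py | _fix_quotes
-- ===== SOURCE A (Python) =====
-- from typing import Callable, Any, TypeVar, NamedTuple, Set, List, Optional
--
-- def _fix_quotes(tokens: List[str]) -> List[str]:
--     """Fix unclosed quotes in token sequence."""
--     result = tokens.copy()
--     quote_count = sum(1 for t in result if t in ['"', "'"])
--     if quote_count % 2 == 1:
--         for t in reversed(result):
--             if t in ['"', "'"]:
--                 result.append(t)
--                 break
--     return result
-- ===== SOURCE B (Python) =====
-- def _fix_quotes(tokens):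
--     """Fix unclosed quotes by simulating quote pairing: each quote token
--     alternately opens or closes a quote; a quote left open at the end of
--     the sequence is closed by appending it."""
--     open_quote = None
--     for t in tokens:
--         if t in ('"', "'"):
--             open_quote = None if open_quote is not None else t
--     return list(tokens) + ([open_quote] if open_quote is not None else [])
-- ===== Notes on version B (the rewrite author's own statement) =====
-- stated objective: alternative
-- what changed: Replaces A's counting (full quote count, then a reversed search for the last quote) with a pairing state machine: a single open/closed toggle that holds the currently open quote token, closed at the end if still open; no count and no reversed scan exist in B.
import Mathlib
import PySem

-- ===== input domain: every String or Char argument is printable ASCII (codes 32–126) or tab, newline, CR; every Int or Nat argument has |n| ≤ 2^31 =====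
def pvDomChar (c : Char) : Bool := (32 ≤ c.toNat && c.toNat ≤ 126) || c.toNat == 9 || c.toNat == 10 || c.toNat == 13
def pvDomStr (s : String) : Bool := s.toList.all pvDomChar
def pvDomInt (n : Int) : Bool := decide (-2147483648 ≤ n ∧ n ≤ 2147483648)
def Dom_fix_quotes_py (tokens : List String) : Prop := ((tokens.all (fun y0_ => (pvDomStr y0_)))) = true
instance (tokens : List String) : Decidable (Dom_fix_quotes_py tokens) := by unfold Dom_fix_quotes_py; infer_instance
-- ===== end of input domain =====

-- B replaces A's counting (full quote count + reversed search for the last quote) with a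
-- quote-pairing state machine: one toggle holding the currently open quote; objective: alternative.

-- t in ['"', "'"]
def pvIsQuote (t : String) : Bool := t == "\"" || t == "'"

-- ===== PORT A =====
def fix_quotes_py (tokens : List String) : List String :=
  let result := tokens
  -- quote_count = sum(1 for t in result if t in ['"', "'"])
  let quote_count : Int := result.foldl (fun acc t => if pvIsQuote t then acc + 1 else acc) 0
  if quote_count % 2 == 1 then
    -- for t in reversed(result): if t in ['"', "'"]: result.append(t); break
    match result.reverse.find? pvIsQuote with
    | some t => result ++ [t]
    | none => result
  else result

-- ===== PORT B =====
-- open_quote toggles: a quote token closes the open quote if there is one, else opens one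
def fix_quotes_py_alt (tokens : List String) : List String :=
  let open_quote : Option String :=
    tokens.foldl (fun o t => if pvIsQuote t then (if o.isSome then none else some t) else o) none
  match open_quote with
  | some t => tokens ++ [t]
  | none => tokens

-- ===== PRECONDITION & SPEC =====
def Spec_fix_quotes_py (tokens : List String) (out : List String) : Prop := out = fix_quotes_py_alt tokens
instance (tokens : List String) (out : List String) : Decidable (Spec_fix_quotes_py tokens out) := by unfold Spec_fix_quotes_py; infer_instance

-- ===== CLAIM (what is proved, stated in full; the proofs are below) =====
def Claim_equal_fix_quotes_py : Prop := ∀ (tokens : List String), Dom_fix_quotes_py tokens → Spec_fix_quotes_py tokens (fix_quotes_py tokens)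

-- ===== LEMMAS AND PROOFS =====

-- A's count loop computes the number of quote tokens.
theorem pv_count_fold (xs : List String) (c : Int) :
    xs.foldl (fun acc t => if pvIsQuote t then acc + 1 else acc) c
      = c + (xs.countP pvIsQuote : Nat) := by
  induction xs generalizing c with
  | nil => simp
  | cons x rest ih =>
    simp only [List.foldl_cons, List.countP_cons, ih]
    by_cases h : pvIsQuote x = true <;> simp [h] <;> push_cast <;> ring

-- B's toggle ends open exactly when the total quote parity is odd, holding the
-- last quote of xs (or the initial open quote if xs has none).
theorem pv_toggle_fold (xs : List String) (o : Option String) :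
    xs.foldl (fun o t => if pvIsQuote t then (if o.isSome then none else some t) else o) o
      = if (xs.countP pvIsQuote + (if o.isSome then 1 else 0)) % 2 = 1 then
          (xs.reverse.find? pvIsQuote).or o
        else none := by
  induction xs generalizing o with
  | nil => cases o <;> simp
  | cons x rest ih =>
    simp only [List.foldl_cons, List.reverse_cons, List.find?_append, List.countP_cons]
    by_cases h : pvIsQuote x = true
    · cases o with
      | none =>
        simp only [h, if_true, Option.isSome_none, Bool.false_eq_true, if_false, ih]
        cases hf : rest.reverse.find? pvIsQuote with
        | some t => simp [hf, List.find?, h, Option.or]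
        | none =>
          have h0 : rest.countP pvIsQuote = 0 := by
            rw [List.countP_eq_zero]
            intro t ht
            exact List.find?_eq_none.mp hf t (by simpa using ht)
          simp [hf, h0, List.find?, h, Option.or]
      | some s =>
        simp only [h, if_true, Option.isSome_some, if_true, ih]
        cases hf : rest.reverse.find? pvIsQuote with
        | some t =>
          simp only [hf, Option.or]
          split_ifs with h1 h2 h2 <;> simp_all <;> omega
        | none =>
          have h0 : rest.countP pvIsQuote = 0 := by
            rw [List.countP_eq_zero]
            intro t ht
            exact List.find?_eq_none.mp hf t (by simpa using ht)
          simp [hf, h0, List.find?, h, Option.or]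
    · simp only [h, Bool.false_eq_true, if_false, ih]
      have hx : List.find? pvIsQuote [x] = none := by simp [List.find?, h]
      simp [hx, Option.orElse]

-- ===== VERDICT (by name: the statement is the Claim_ definition above) =====
theorem fix_quotes_py_spec : Claim_equal_fix_quotes_py := by
  intro tokens _
  unfold Spec_fix_quotes_py fix_quotes_py fix_quotes_py_alt
  simp only [pv_count_fold, pv_toggle_fold, Int.zero_add, Option.isSome_none,
    Bool.false_eq_true, if_false, Nat.add_zero]
  by_cases hp : tokens.countP pvIsQuote % 2 = 1
  · have hmod : (((tokens.countP pvIsQuote : Nat) : Int) % 2 == 1) = true := by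
      simp only [beq_iff_eq]; omega
    simp only [hp, if_true, hmod]
    cases hf : tokens.reverse.find? pvIsQuote <;> simp [hf, Option.or]
  · have hmod : (((tokens.countP pvIsQuote : Nat) : Int) % 2 == 1) = false := by
      simp only [beq_eq_false_iff_ne, ne_eq]; omega
    simp [hp, hmod]
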